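-- pv_equiv track=rewrite | github.com/ulab-uiuc/Open-On-Policy-Distillation | examples/on_policy_distillation/analyze_reward_and_boxed_logprob.py | _find_think_spans
-- ===== SOURCE A (Python) =====
-- def _find_think_spans(text: str) -> list[tuple[int, int]]:
--     spans: list[tuple[int, int]] = []
--     pos = 0
--     open_tag = "<think>"
--     close_tag = "</think>"
--     while True:
--         s = text.find(open_tag, pos)
--         if s < 0:
--             break
--         content_start = s + len(open_tag)
--         e = text.find(close_tag, content_start)
--         if e < 0:
--             spans.append((content_start, len(text)))
--             break
--         spans.append((content_start, e))
--         pos = e + len(close_tag)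
--     return spans
-- ===== SOURCE B (Python) =====
-- def _find_think_spans(text: str) -> list[tuple[int, int]]:
--     # Single left-to-right state-machine scan: track whether we are inside an
--     # open span; emit a span on each close tag, and an end-of-text span if
--     # still inside when the text runs out.
--     spans: list[tuple[int, int]] = []
--     n = len(text)
--     i = 0
--     start = None  # None = outside a think span; otherwise content start index
--     while i < n:
--         if start is None:
--             if text.startswith("<think>", i):
--                 i += 7
--                 start = i
--             else:
--                 i += 1
--         else:
--             if text.startswith("</think>", i):
--                 spans.append((start, i))
--                 start = None
--                 i += 8
--             else:
--                 i += 1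
--     if start is not None:
--         spans.append((start, n))
--     return spans
-- ===== Notes on version B (the rewrite author's own statement) =====
-- stated objective: alternative
-- what changed: Replaces A's repeated str.find sub-searches for open/close tags with a single left-to-right state-machine scan that tracks an inside/outside state and emits spans on tag transitions.
import Mathlib
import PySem

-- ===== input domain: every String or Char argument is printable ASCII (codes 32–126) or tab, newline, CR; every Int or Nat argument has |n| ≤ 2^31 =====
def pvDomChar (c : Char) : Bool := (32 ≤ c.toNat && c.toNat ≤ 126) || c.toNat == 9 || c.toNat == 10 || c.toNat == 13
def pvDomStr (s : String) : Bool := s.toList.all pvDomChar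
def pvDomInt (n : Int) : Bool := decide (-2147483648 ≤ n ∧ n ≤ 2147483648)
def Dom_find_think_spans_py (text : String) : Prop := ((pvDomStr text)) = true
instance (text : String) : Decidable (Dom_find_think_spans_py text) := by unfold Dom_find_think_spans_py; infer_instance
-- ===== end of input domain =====

-- B replaces A's repeated str.find sub-searches with a single left-to-right
-- state-machine scan (objective: alternative; same asymptotic cost).

-- ===== PORT A =====
def pvOT : List Char := ['<', 't', 'h', 'i', 'n', 'k', '>']      -- "<think>"
def pvCT : List Char := ['<', '/', 't', 'h', 'i', 'n', 'k', '>'] -- "</think>"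

-- A's while-loop; fuel (length + 1) is strictly more than the possible
-- number of iterations, since pos grows by ≥ 15 per iteration.
def pvLoopA (text : List Char) (pos : Int) (spans : List (Int × Int)) : Nat → List (Int × Int)
  | 0 => spans
  | fuel + 1 =>
    let s := PySem.Chars.findFrom text pvOT pos none
    if s < 0 then spans
    else
      let contentStart := s + 7
      let e := PySem.Chars.findFrom text pvCT contentStart none
      if e < 0 then spans ++ [(contentStart, (text.length : Int))]
      else pvLoopA text (e + 8) (spans ++ [(contentStart, e)]) fuel

def find_think_spans_py (text : String) : List (Int × Int) :=
  pvLoopA text.toList 0 [] (text.toList.length + 1)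

-- ===== PORT B =====
-- B's while loop: one pass, st = none ↔ outside a think span.
def pvScanB (s : List Char) (i : Nat) (st : Option Nat) : List (Int × Int) :=
  match s, st with
  | [], none => []
  | [], some a => [((a : Int), (i : Int))]
  | c :: rest, none =>
    if PySem.Chars.startswith (c :: rest) pvOT then
      pvScanB (rest.drop 6) (i + 7) (some (i + 7))
    else
      pvScanB rest (i + 1) none
  | c :: rest, some a =>
    if PySem.Chars.startswith (c :: rest) pvCT then
      ((a : Int), (i : Int)) :: pvScanB (rest.drop 7) (i + 8) none
    else
      pvScanB rest (i + 1) (some a)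
termination_by s.length
decreasing_by all_goals (simp; try omega)

def find_think_spans_py_alt (text : String) : List (Int × Int) :=
  pvScanB text.toList 0 none

-- ===== PRECONDITION & SPEC =====
def Spec_find_think_spans_py (text : String) (out : List (Int × Int)) : Prop := out = find_think_spans_py_alt text
instance (text : String) (out : List (Int × Int)) : Decidable (Spec_find_think_spans_py text out) := by unfold Spec_find_think_spans_py; infer_instance

-- ===== CLAIM (what is proved, stated in full; the proofs are below) =====
def Claim_equal_find_think_spans_py : Prop := ∀ (text : String), Dom_find_think_spans_py text → Spec_find_think_spans_py text (find_think_spans_py text)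

-- ===== LEMMAS AND PROOFS =====



theorem pv_find_eq_of (s sub : List Char) (k : Nat)
    (hpre : sub <+: s.drop k) (hmin : ∀ i < k, ¬ sub <+: s.drop i) :
    PySem.Chars.find s sub = k := by
  have hinfix : sub <:+: s := by
    rcases hpre with ⟨t2, ht⟩
    exact ⟨s.take k, t2, by rw [List.append_assoc, ht, List.take_append_drop]⟩
  have h0 : 0 ≤ PySem.Chars.find s sub := (PySem.Chars.find_nonneg_iff s sub).2 hinfix
  obtain ⟨hp, hm⟩ := PySem.Chars.find_spec h0
  have hfk : (PySem.Chars.find s sub).toNat = k := by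
    rcases lt_trichotomy (PySem.Chars.find s sub).toNat k with h | h | h
    · exact absurd hp (hmin _ h)
    · exact h
    · exact absurd hpre (hm k h)
  omega

theorem pv_find_of_prefix (s sub : List Char) (h : sub <+: s) :
    PySem.Chars.find s sub = 0 := by
  have := pv_find_eq_of s sub 0 (by simpa) (by omega)
  simpa using this

theorem pv_find_cons_of_not_prefix (c : Char) (u sub : List Char) (h : ¬ sub <+: c :: u) :
    PySem.Chars.find (c :: u) sub =
      if PySem.Chars.find u sub = -1 then -1 else 1 + PySem.Chars.find u sub := by
  by_cases hu : PySem.Chars.find u sub = -1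
  · rw [if_pos hu, PySem.Chars.find_eq_neg_one_iff]
    rw [PySem.Chars.find_eq_neg_one_iff] at hu
    intro hc
    rcases List.infix_cons_iff.1 hc with h1 | h2
    · exact h h1
    · exact hu h2
  · have h0 : 0 ≤ PySem.Chars.find u sub := by
      have := PySem.Chars.neg_one_le_find u sub; omega
    obtain ⟨hp, hm⟩ := PySem.Chars.find_spec h0
    rw [if_neg hu]
    have key : PySem.Chars.find (c :: u) sub = ((PySem.Chars.find u sub).toNat + 1 : Nat) := by
      apply pv_find_eq_of
      · simpa [List.drop_succ_cons] using hp
      · intro i hi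
        cases i with
        | zero => simpa using h
        | succ j => simpa [List.drop_succ_cons] using hm j (by omega)
    rw [key]; omega

theorem pv_findFrom_of_prefix (t sub : List Char) (k : Nat) (hk : k ≤ t.length)
    (h : sub <+: t.drop k) :
    PySem.Chars.findFrom t sub (k : Int) none = (k : Int) := by
  rw [PySem.Chars.findFrom_natCast t sub k hk, pv_find_of_prefix _ _ h]
  simp

theorem pv_findFrom_succ (t sub : List Char) (k : Nat) (hk : k < t.length)
    (h : ¬ sub <+: t.drop k) :
    PySem.Chars.findFrom t sub (k : Int) none = PySem.Chars.findFrom t sub ((k + 1 : Nat) : Int) none := by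
  rw [PySem.Chars.findFrom_natCast t sub k (by omega),
      PySem.Chars.findFrom_natCast t sub (k + 1) (by omega),
      List.drop_eq_getElem_cons hk,
      pv_find_cons_of_not_prefix _ _ _ (by rwa [← List.drop_eq_getElem_cons hk])]
  by_cases h2 : PySem.Chars.find (t.drop (k + 1)) sub = -1
  · simp [h2]
  · have h0 : 0 ≤ PySem.Chars.find (t.drop (k + 1)) sub := by
      have := PySem.Chars.neg_one_le_find (t.drop (k + 1)) sub; omega
    rw [if_neg h2, if_neg (by omega), if_neg h2]
    push_cast
    ring

theorem pv_scan_none_aux (t : List Char) :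
    ∀ (d k : Nat), t.length - k ≤ d → k ≤ t.length →
    pvScanB (t.drop k) k none =
      if PySem.Chars.findFrom t pvOT (k : Int) none = -1 then []
      else
        pvScanB (t.drop ((PySem.Chars.findFrom t pvOT (k : Int) none).toNat + 7))
          ((PySem.Chars.findFrom t pvOT (k : Int) none).toNat + 7)
          (some ((PySem.Chars.findFrom t pvOT (k : Int) none).toNat + 7)) := by
  intro d
  induction d with
  | zero =>
    intro k hd hk
    have hkn : t.length ≤ k := by omega
    rw [List.drop_eq_nil_of_le hkn]
    rw [if_pos ((PySem.Chars.findFrom_natCast_eq_neg_one_iff t pvOT k hk).2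
      (by rw [List.drop_eq_nil_of_le hkn]; simp [List.infix_nil, pvOT]))]
    simp [pvScanB]
  | succ d ih =>
    intro k hd hk
    by_cases hkn : t.length ≤ k
    · rw [List.drop_eq_nil_of_le hkn]
      rw [if_pos ((PySem.Chars.findFrom_natCast_eq_neg_one_iff t pvOT k hk).2
        (by rw [List.drop_eq_nil_of_le hkn]; simp [List.infix_nil, pvOT]))]
      simp [pvScanB]
    · have hlt : k < t.length := by omega
      rw [List.drop_eq_getElem_cons hlt, pvScanB]
      by_cases hsw : PySem.Chars.startswith (t[k] :: t.drop (k + 1)) pvOT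
      · have hpre : pvOT <+: t.drop k := by
          rw [List.drop_eq_getElem_cons hlt]
          exact (PySem.Chars.startswith_iff _ _).1 hsw
        rw [if_pos hsw, pv_findFrom_of_prefix t pvOT k hk hpre]
        rw [if_neg (by omega), Int.toNat_natCast]
        rw [List.drop_drop]
      · have hnp : ¬ pvOT <+: t.drop k := by
          rw [List.drop_eq_getElem_cons hlt]
          exact fun hc => hsw ((PySem.Chars.startswith_iff _ _).2 hc)
        rw [if_neg hsw, pv_findFrom_succ t pvOT k hlt hnp]
        exact ih (k + 1) (by omega) (by omega)

theorem pv_scan_some_aux (t : List Char) :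
    ∀ (d a k : Nat), t.length - k ≤ d → k ≤ t.length →
    pvScanB (t.drop k) k (some a) =
      if PySem.Chars.findFrom t pvCT (k : Int) none = -1 then [((a : Int), (t.length : Int))]
      else ((a : Int), ((PySem.Chars.findFrom t pvCT (k : Int) none).toNat : Int)) ::
        pvScanB (t.drop ((PySem.Chars.findFrom t pvCT (k : Int) none).toNat + 8))
          ((PySem.Chars.findFrom t pvCT (k : Int) none).toNat + 8) none := by
  intro d
  induction d with
  | zero =>
    intro a k hd hk
    have hkn : t.length ≤ k := by omega
    have hke : k = t.length := by omega
    rw [List.drop_eq_nil_of_le hkn]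
    rw [if_pos ((PySem.Chars.findFrom_natCast_eq_neg_one_iff t pvCT k hk).2
      (by rw [List.drop_eq_nil_of_le hkn]; simp [List.infix_nil, pvCT]))]
    simp [pvScanB, hke]
  | succ d ih =>
    intro a k hd hk
    by_cases hkn : t.length ≤ k
    · have hke : k = t.length := by omega
      rw [List.drop_eq_nil_of_le hkn]
      rw [if_pos ((PySem.Chars.findFrom_natCast_eq_neg_one_iff t pvCT k hk).2
        (by rw [List.drop_eq_nil_of_le hkn]; simp [List.infix_nil, pvCT]))]
      simp [pvScanB, hke]
    · have hlt : k < t.length := by omega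
      rw [List.drop_eq_getElem_cons hlt, pvScanB]
      by_cases hsw : PySem.Chars.startswith (t[k] :: t.drop (k + 1)) pvCT
      · have hpre : pvCT <+: t.drop k := by
          rw [List.drop_eq_getElem_cons hlt]
          exact (PySem.Chars.startswith_iff _ _).1 hsw
        rw [if_pos hsw, pv_findFrom_of_prefix t pvCT k hk hpre]
        rw [if_neg (by omega), Int.toNat_natCast]
        rw [List.drop_drop]
      · have hnp : ¬ pvCT <+: t.drop k := by
          rw [List.drop_eq_getElem_cons hlt]
          exact fun hc => hsw ((PySem.Chars.startswith_iff _ _).2 hc)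
        rw [if_neg hsw, pv_findFrom_succ t pvCT k hlt hnp]
        exact ih a (k + 1) (by omega) (by omega)

theorem pv_loop_eq (t : List Char) :
    ∀ (fuel k : Nat) (spans : List (Int × Int)), k ≤ t.length → t.length < k + fuel →
      pvLoopA t (k : Int) spans fuel = spans ++ pvScanB (t.drop k) k none := by
  intro fuel
  induction fuel with
  | zero => intro k spans h1 h2; omega
  | succ fuel ih =>
    intro k spans hk hf
    rw [pv_scan_none_aux t (t.length - k) k le_rfl hk]
    by_cases hs : PySem.Chars.findFrom t pvOT (k : Int) none = -1
    · simp [pvLoopA, hs]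
    · obtain ⟨hge, hpre, _⟩ := PySem.Chars.findFrom_natCast_spec t pvOT k hk hs
      set s := PySem.Chars.findFrom t pvOT (k : Int) none with hs_def
      have hs0 : 0 ≤ s := le_trans (by positivity) hge
      set m := s.toNat with hm_def
      have hsm : s = (m : Int) := (Int.toNat_of_nonneg hs0).symm
      have hm7 : m + 7 ≤ t.length := by
        have := hpre.length_le
        simp [pvOT] at this
        omega
      have hcs : s + 7 = ((m + 7 : Nat) : Int) := by omega
      rw [if_neg hs]
      rw [pv_scan_some_aux t (t.length - (m + 7)) (m + 7) (m + 7) le_rfl hm7]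
      by_cases he : PySem.Chars.findFrom t pvCT ((m + 7 : Nat) : Int) none = -1
      · rw [if_pos he]
        simp only [pvLoopA]
        rw [if_neg (by omega), hcs, he]
        norm_num
      · obtain ⟨hge2, hpre2, _⟩ := PySem.Chars.findFrom_natCast_spec t pvCT (m + 7) hm7 he
        rw [if_neg he]
        set e := PySem.Chars.findFrom t pvCT ((m + 7 : Nat) : Int) none with he_def
        have he0 : 0 ≤ e := le_trans (by positivity) hge2
        set p := e.toNat with hp_def
        have hep : e = (p : Int) := (Int.toNat_of_nonneg he0).symm
        have hp8 : p + 8 ≤ t.length := by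
          have := hpre2.length_le
          simp [pvCT] at this
          omega
        have hpge : m + 7 ≤ p := by omega
        simp only [pvLoopA]
        rw [if_neg (by omega), hcs, ← he_def, if_neg (by omega)]
        have he8 : e + 8 = ((p + 8 : Nat) : Int) := by omega
        rw [he8, ih (p + 8) (spans ++ [(((m + 7 : Nat) : Int), e)]) hp8 (by omega)]
        rw [hep]
        simp

-- ===== VERDICT (by name: the statement is the Claim_ definition above) =====
theorem find_think_spans_py_spec : Claim_equal_find_think_spans_py := by
  intro text _
  unfold Spec_find_think_spans_py find_think_spans_py find_think_spans_py_alt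
  have h := pv_loop_eq text.toList (text.toList.length + 1) 0 [] (Nat.zero_le _) (by omega)
  simpa using h
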